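-- pv_equiv track=rewrite | github.com/brettonsimpson/pynoseti | functions.py | separated_hex_values
-- ===== SOURCE A (Python) =====
-- def separated_hex_values(packet):
--     '''
--     This function reads in a list of hexadecimal packet data, without spaces between each pair of characters,
--     and separates each hexadecimal value and assings them to a list so that they can be iterated over within
--     a loop for further processing.
--     '''
--     separated_hexadecimal_array = []
--     packet_length = len(packet)
--     i = 0
--     j = 1
--     for character in packet:
--         if j < packet_length:
--             separated_hexadecimal_array.append(packet[i]+packet[j])
--             i += 2
--             j += 2
--     return separated_hexadecimal_array
-- ===== SOURCE B (Python) =====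
-- def separated_hex_values(packet):
--     it = iter(packet)
--     return [a + b for a, b in zip(it, it)]
-- ===== Notes on version B (the rewrite author's own statement) =====
-- stated objective: idiomatic
-- what changed: Replaces A's whole-string scan with manually advanced i/j index counters and a guard by the standard idiom zip(it, it) over a single iterator, consuming the string two characters at a time with no indices.
import Mathlib
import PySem

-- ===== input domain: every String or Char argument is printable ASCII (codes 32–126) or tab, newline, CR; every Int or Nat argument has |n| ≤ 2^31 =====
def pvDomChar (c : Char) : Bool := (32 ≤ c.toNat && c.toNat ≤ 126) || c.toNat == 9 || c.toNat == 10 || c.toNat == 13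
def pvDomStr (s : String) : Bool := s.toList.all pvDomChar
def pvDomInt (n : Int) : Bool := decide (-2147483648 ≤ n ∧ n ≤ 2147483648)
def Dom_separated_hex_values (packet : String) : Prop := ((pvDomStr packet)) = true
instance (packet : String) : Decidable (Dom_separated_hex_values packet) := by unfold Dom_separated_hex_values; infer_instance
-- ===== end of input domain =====

-- B replaces A's index-counter scan with the idiomatic zip(it, it) pairwise grouping; same O(n) cost.


-- ===== PORT A =====
-- the loop 'for character in packet: if j < packet_length: append(packet[i]+packet[j]); i += 2; j += 2'
-- (the loop variable is unused; indexing is via pyGetD — exact here because whenever the branch is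
-- taken we have 0 ≤ i < j < len, so both indices are in range and the default is never used)
def sepALoop (cs : List Char) (n : Int) : List Char → Int → Int → List String → List String
  | [], _, _, acc => acc
  | _ :: rest, i, j, acc =>
    if j < n then
      sepALoop cs n rest (i + 2) (j + 2)
        (acc ++ [String.ofList [PySem.List.pyGetD cs i ' ', PySem.List.pyGetD cs j ' ']])
    else
      sepALoop cs n rest i j acc

def separated_hex_values (packet : String) : List String :=
  sepALoop packet.toList (PySem.Str.len packet) packet.toList 0 1 []

-- ===== PORT B =====
-- zip(it, it) over one iterator pairs consecutive characters, dropping a trailing odd one;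
-- the comprehension concatenates each pair
def pairsB : List Char → List String
  | a :: b :: rest => String.ofList [a, b] :: pairsB rest
  | _ => []

def separated_hex_values_alt (packet : String) : List String :=
  pairsB packet.toList

-- ===== PRECONDITION & SPEC =====
def Spec_separated_hex_values (packet : String) (out : List String) : Prop := out = separated_hex_values_alt packet
instance (packet : String) (out : List String) : Decidable (Spec_separated_hex_values packet out) := by unfold Spec_separated_hex_values; infer_instance

-- ===== CLAIM (what is proved, stated in full; the proofs are below) =====
def Claim_equal_separated_hex_values : Prop := ∀ (packet : String), Dom_separated_hex_values packet → Spec_separated_hex_values packet (separated_hex_values packet)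

-- ===== LEMMAS AND PROOFS =====

lemma pairsB_short (cs : List Char) (h : cs.length ≤ 1) : pairsB cs = [] := by
  match cs, h with
  | [], _ => rfl
  | [_], _ => rfl

-- loop invariant: with j = i + 1 and enough iterations left, the loop appends exactly the
-- consecutive pairs of cs starting at index i
lemma sepALoop_eq (cs : List Char) :
    ∀ (rest : List Char) (i : Int) (acc : List String), 0 ≤ i →
      (cs.length : Int) - 1 - i ≤ 2 * rest.length →
      sepALoop cs (cs.length : Int) rest i (i + 1) acc = acc ++ pairsB (cs.drop i.toNat) := by
  intro rest
  induction rest with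
  | nil =>
    intro i acc hi hb
    simp only [sepALoop]
    have hb' : (cs.length : Int) ≤ i + 1 := by simpa using hb
    rw [pairsB_short _ (by simp only [List.length_drop]; omega), List.append_nil]
  | cons c rest ih =>
    intro i acc hi hb
    simp only [sepALoop, List.length_cons] at *
    by_cases hj : i + 1 < (cs.length : Int)
    · simp only [if_pos hj]
      have hi1 : i.toNat < cs.length := by omega
      have hi2 : i.toNat + 1 < cs.length := by omega
      have hdrop : cs.drop i.toNat = cs[i.toNat] :: cs[i.toNat + 1] :: cs.drop (i.toNat + 2) := by
        rw [← List.getElem_cons_drop hi1, ← List.getElem_cons_drop hi2]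
      have hg1 : PySem.List.pyGetD cs i ' ' = cs[i.toNat] :=
        PySem.List.pyGetD_eq_getElem cs ' ' hi (by omega)
      have hg2 : PySem.List.pyGetD cs (i + 1) ' ' = cs[i.toNat + 1] := by
        have ht : (i + 1).toNat = i.toNat + 1 := by omega
        rw [PySem.List.pyGetD_eq_getElem cs ' ' (by omega) (by omega)]
        simp [ht]
      have harg : i + 1 + 2 = (i + 2) + 1 := by ring
      rw [hg1, hg2, harg, ih (i + 2) _ (by omega) (by omega)]
      have : (i + 2).toNat = i.toNat + 2 := by omega
      rw [this, hdrop]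
      simp [pairsB]
    · simp only [if_neg hj]
      rw [ih i acc hi (by omega)]

lemma sepA_main (cs : List Char) :
    sepALoop cs (cs.length : Int) cs 0 1 [] = pairsB cs := by
  have h := sepALoop_eq cs cs 0 [] le_rfl (by omega)
  simpa using h

-- ===== VERDICT (by name: the statement is the Claim_ definition above) =====
theorem separated_hex_values_spec : Claim_equal_separated_hex_values := by
  intro packet _
  unfold Spec_separated_hex_values separated_hex_values separated_hex_values_alt
  rw [show PySem.Str.len packet = (packet.toList.length : Int) from by simp [PySem.Str.len_eq]]
  exact sepA_main packet.toList
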